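-- pv_equiv track=rewrite | github.com/Sam-Radnus/DSAlgo-Questions | ReducingDishes.py | maxSatisfaction
-- ===== SOURCE A (Python) =====
-- from typing import List
--
-- def maxSatisfaction(satisfaction: List[int]) -> int:
--     satisfaction.sort(reverse=True)
--     ps,res,curr=0,0,0
--     for i in range(len(satisfaction)):
--         ps+=satisfaction[i]
--         curr+=ps
--         res=max(res,curr)
--     return res
-- ===== SOURCE B (Python) =====
-- from typing import List
--
-- def maxSatisfaction(satisfaction: List[int]) -> int:
--     satisfaction.sort(reverse=True)
--     best = 0
--     for k in range(len(satisfaction) + 1):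
--         total = 0
--         for i in range(k):
--             total += (k - i) * satisfaction[i]
--         best = max(best, total)
--     return best
-- ===== Notes on version B (the rewrite author's own statement) =====
-- stated objective: alternative
-- what changed: Replaces A's single incremental prefix-sum/running-total pass with a nested scan that recomputes the time-weighted total of each top-k prefix from scratch and takes the maximum over all k (including k=0).
import Mathlib
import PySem

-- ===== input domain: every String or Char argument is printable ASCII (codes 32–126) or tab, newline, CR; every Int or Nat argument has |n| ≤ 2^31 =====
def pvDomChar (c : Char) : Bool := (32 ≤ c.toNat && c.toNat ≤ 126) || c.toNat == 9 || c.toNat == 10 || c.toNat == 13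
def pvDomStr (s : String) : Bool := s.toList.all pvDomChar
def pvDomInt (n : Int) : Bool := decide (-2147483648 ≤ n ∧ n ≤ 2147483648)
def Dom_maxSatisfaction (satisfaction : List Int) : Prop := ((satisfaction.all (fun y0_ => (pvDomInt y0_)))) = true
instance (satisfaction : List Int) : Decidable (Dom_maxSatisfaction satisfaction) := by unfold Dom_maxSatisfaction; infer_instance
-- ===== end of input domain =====

-- B recomputes each top-k prefix's time-weighted total from scratch (nested scan) instead of A's
-- incremental prefix-sum pass; same return value, and both sort the argument descending in place
-- (the equivalence proved here is about the return value; B performs the same in-place sort).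

-- ===== PORT A =====
def maxSatisfaction (satisfaction : List Int) : Int :=
  let s := PySem.List.sorted satisfaction (fun x => x) true
  let r := (PySem.List.pyRange 0 (s.length : Int) 1).foldl
    (fun (acc : Int × Int × Int) i =>
      let ps := acc.1 + PySem.List.pyGetD s i 0
      let curr := acc.2.2 + ps
      let res := max acc.2.1 curr
      (ps, res, curr)) (0, 0, 0)
  r.2.1

-- ===== PORT B =====
def maxSatisfaction_alt (satisfaction : List Int) : Int :=
  let s := PySem.List.sorted satisfaction (fun x => x) true
  (PySem.List.pyRange 0 ((s.length : Int) + 1) 1).foldl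
    (fun best k =>
      max best ((PySem.List.pyRange 0 k 1).foldl
        (fun total i => total + (k - i) * PySem.List.pyGetD s i 0) 0)) 0

-- ===== PRECONDITION & SPEC =====
def Spec_maxSatisfaction (satisfaction : List Int) (out : Int) : Prop := out = maxSatisfaction_alt satisfaction
instance (satisfaction : List Int) (out : Int) : Decidable (Spec_maxSatisfaction satisfaction out) := by unfold Spec_maxSatisfaction; infer_instance

-- ===== CLAIM (what is proved, stated in full; the proofs are below) =====
def Claim_equal_maxSatisfaction : Prop := ∀ (satisfaction : List Int), Dom_maxSatisfaction satisfaction → Spec_maxSatisfaction satisfaction (maxSatisfaction satisfaction)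

-- ===== LEMMAS AND PROOFS =====

-- A's loop body as a function of the current element
def pvStepA (acc : Int × Int × Int) (v : Int) : Int × Int × Int :=
  (acc.1 + v, max acc.2.1 (acc.2.2 + (acc.1 + v)), acc.2.2 + (acc.1 + v))

-- B's inner loop: time-weighted total of the first K elements of t
def pvTot (t : List Int) (K : Int) : Int :=
  (PySem.List.pyRange 0 K 1).foldl
    (fun total i => total + (K - i) * PySem.List.pyGetD t i 0) 0

-- the same total, mathematically, for the whole list
def pvW (t : List Int) : Int :=
  ((List.range t.length).map (fun i => ((t.length : Int) - i) * t.getD i 0)).sum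

-- B's outer loop over t
def pvBcore (t : List Int) : Int :=
  (PySem.List.pyRange 0 ((t.length : Int) + 1) 1).foldl (fun b k => max b (pvTot t k)) 0

theorem pv_map_getD_range_eq_take (t : List Int) (m : Nat) (h : m ≤ t.length) :
    (List.range m).map (fun i => t.getD i 0) = t.take m := by
  apply List.ext_getElem
  · simp [h]
  · intro i h1 h2
    simp only [List.length_map, List.length_range] at h1
    simp [List.getElem_take, Nat.lt_of_lt_of_le h1 h]

theorem pv_sum_split (m : Nat) (c : Int) (a : Nat → Int) :
    ((List.range m).map (fun i => (c + 1 - i) * a i)).sum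
      = ((List.range m).map (fun i => (c - i) * a i)).sum + ((List.range m).map a).sum := by
  rw [show (fun i : Nat => (c + 1 - i) * a i) = fun i => (c - i) * a i + a i from funext fun i => by ring]
  exact PySem.List.sum_map_add_int _ _ _

theorem pv_tot_eq_sum (t : List Int) (k : Nat) :
    pvTot t (k : Int) = ((List.range k).map (fun j => ((k : Int) - j) * t.getD j 0)).sum := by
  unfold pvTot
  rw [PySem.List.pyRange_zero_nat, List.foldl_map, PySem.List.foldl_add]
  simp

theorem pv_W_append (t : List Int) (x : Int) :
    pvW (t ++ [x]) = pvW t + t.sum + x := by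
  unfold pvW
  have hlen : (t ++ [x]).length = t.length + 1 := by simp
  rw [hlen, List.range_succ, List.map_append, List.sum_append]
  have hmap : (List.range t.length).map (fun i => (((t.length + 1 : Nat) : Int) - i) * (t ++ [x]).getD i 0)
      = (List.range t.length).map (fun i => (((t.length : Nat) : Int) + 1 - i) * t.getD i 0) := by
    apply List.map_congr_left
    intro i hi
    simp only [List.mem_range] at hi
    rw [List.getD_append _ _ _ _ hi]
    push_cast; ring_nf
  rw [hmap, pv_sum_split t.length (t.length : Int) (fun i => t.getD i 0),
      pv_map_getD_range_eq_take t t.length le_rfl, List.take_length]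
  simp

theorem pv_tot_eq_W_take (t : List Int) (k : Nat) (h : k ≤ t.length) :
    pvTot t (k : Int) = pvW (t.take k) := by
  rw [pv_tot_eq_sum]
  unfold pvW
  rw [List.length_take, Nat.min_eq_left h]
  apply congrArg
  apply List.map_congr_left
  intro i hi
  simp only [List.mem_range] at hi
  rw [List.getD_eq_getElem t _ (by omega),
      List.getD_eq_getElem (t.take k) _ (by simp [List.length_take]; omega)]
  simp [List.getElem_take]

theorem pv_tot_eq_W (t : List Int) : pvTot t (t.length : Int) = pvW t := by
  rw [pv_tot_eq_W_take t t.length le_rfl, List.take_length]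

theorem pv_Bcore_append (t : List Int) (x : Int) :
    pvBcore (t ++ [x]) = max (pvBcore t) (pvW (t ++ [x])) := by
  unfold pvBcore
  have hlen : (((t ++ [x]).length : Nat) : Int) + 1 = ((t.length : Int) + 1) + 1 := by
    simp
  rw [hlen, PySem.List.pyRange_one_succ_right (by positivity), List.foldl_append]
  have hcongr : (PySem.List.pyRange 0 ((t.length : Int) + 1) 1).foldl
      (fun b k => max b (pvTot (t ++ [x]) k)) 0
      = (PySem.List.pyRange 0 ((t.length : Int) + 1) 1).foldl (fun b k => max b (pvTot t k)) 0 := by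
    apply PySem.List.foldl_congr_mem'
    intro k hk b
    rw [PySem.List.mem_pyRange_one] at hk
    obtain ⟨hk0, hk1⟩ := hk
    have hkn : k = ((k.toNat : Nat) : Int) := by omega
    have hle : k.toNat ≤ t.length := by omega
    rw [hkn, pv_tot_eq_W_take (t ++ [x]) k.toNat (by simp; omega),
        pv_tot_eq_W_take t k.toNat hle, List.take_append_of_le_length hle]
  rw [hcongr]
  have hfin : pvTot (t ++ [x]) ((t.length : Int) + 1) = pvW (t ++ [x]) := by
    have : ((t.length : Int) + 1) = (((t ++ [x]).length : Nat) : Int) := by simp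
    rw [this, pv_tot_eq_W]
  simp [hfin]

theorem pv_A_inv (t : List Int) :
    t.foldl pvStepA (0, 0, 0) = (t.sum, pvBcore t, pvW t) := by
  induction t using List.reverseRecOn with
  | nil => simp [pvBcore, pvTot, pvW]; decide
  | append_singleton t x ih =>
    rw [List.foldl_append, ih]
    simp [pvStepA, List.sum_append, pv_Bcore_append, pv_W_append]
    constructor
    · ring_nf
    · ring

-- ===== VERDICT (by name: the statement is the Claim_ definition above) =====
theorem maxSatisfaction_spec : Claim_equal_maxSatisfaction := by
  intro satisfaction _
  unfold Spec_maxSatisfaction maxSatisfaction maxSatisfaction_alt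
  set s := PySem.List.sorted satisfaction (fun x => x) true with hs
  show ((PySem.List.pyRange 0 (s.length : Int) 1).foldl
      (fun (acc : Int × Int × Int) i => pvStepA acc (PySem.List.pyGetD s i 0)) (0,0,0)).2.1
    = pvBcore s
  rw [PySem.List.foldl_pyRange_zero_pyGetD' s 0 pvStepA (0,0,0), pv_A_inv]
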